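-- pv_equiv track=rewrite | github.com/tanmoykdas/Python | AI Course/First_Order_Logic.py | compress_sentences
-- ===== SOURCE A (Python) =====
-- def compress_sentences(sentences):
--     # Split all into word lists
--     word_lists   = [s.split() for s in sentences]
--
--     # Find common starting words
--     prefix = []
--     for words in zip(*word_lists):
--         if len(set(words)) == 1:  # all match
--             prefix.append(words[0])
--         else:
--             break
--
--     # If no common prefix, join with " and "
--     if not prefix:
--         return " and ".join(sentences)
--
--     # Build compressed sentence
--     differences = [" ".join(w[len(prefix):]) for w in word_lists]
--     return " ".join(prefix) + " " + " and ".join(differences)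
-- ===== SOURCE B (Python) =====
-- def compress_sentences(sentences):
--     # Different decomposition: fold a pairwise longest-common-prefix over the
--     # word lists instead of scanning zipped columns with a set.
--     word_lists = [s.split() for s in sentences]
--     if not word_lists:
--         return " and ".join(sentences)
--     prefix = word_lists[0]
--     for words in word_lists[1:]:
--         keep = []
--         for a, b in zip(prefix, words):
--             if a != b:
--                 break
--             keep.append(a)
--         prefix = keep
--     if not prefix:
--         return " and ".join(sentences)
--     differences = [" ".join(w[len(prefix):]) for w in word_lists]
--     return " ".join(prefix) + " " + " and ".join(differences)
-- ===== Notes on version B (the rewrite author's own statement) =====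
-- stated objective: alternative
-- what changed: Replaces A's column-wise scan of zip(*word_lists) with per-column set cardinality tests by a left fold of a pairwise longest-common-prefix over the word lists, guarding the empty input explicitly.
import Mathlib
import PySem

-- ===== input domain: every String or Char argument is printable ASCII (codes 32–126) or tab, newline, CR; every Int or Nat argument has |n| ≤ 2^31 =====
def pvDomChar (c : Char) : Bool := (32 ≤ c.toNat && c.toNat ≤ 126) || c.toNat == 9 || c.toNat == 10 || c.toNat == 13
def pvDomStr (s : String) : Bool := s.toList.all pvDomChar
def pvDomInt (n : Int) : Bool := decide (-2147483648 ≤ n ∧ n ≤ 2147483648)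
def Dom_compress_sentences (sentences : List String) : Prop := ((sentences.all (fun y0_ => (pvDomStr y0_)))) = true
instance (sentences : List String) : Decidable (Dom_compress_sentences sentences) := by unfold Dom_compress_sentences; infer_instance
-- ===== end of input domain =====

-- B replaces A's zip-column/set scan of the common word prefix by a fold of a
-- pairwise longest-common-prefix; same value everywhere (alternative, not faster).

-- ===== PORT A =====

-- termination measure for pvZipStar (cited by its decreasing_by)
theorem pv_tail_sum_lt (ls : List (List String)) (hne : ls ≠ [])
    (hall : ∀ y ∈ ls, y ≠ []) :
    ((ls.map List.tail).map List.length).sum < (ls.map List.length).sum := by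
  induction ls with
  | nil => exact absurd rfl hne
  | cons x xs ih =>
    have hx : x ≠ [] := hall x (by simp)
    have hxl : x.tail.length < x.length := by
      cases x with
      | nil => exact absurd rfl hx
      | cons a as => simp
    cases xs with
    | nil => simpa using hxl
    | cons y ys =>
      have hys := ih (by simp) (fun z hz => hall z (List.mem_cons_of_mem _ hz))
      simp only [List.map_cons, List.sum_cons] at hys ⊢
      omega

-- zip(*word_lists): rows of heads while no list is exhausted (zip() on [] is []).
def pvZipStar (ls : List (List String)) : List (List String) :=
  if h : ls = [] ∨ ls.any (·.isEmpty) then []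
  else (ls.map (fun w => w.headD "")) :: pvZipStar (ls.map List.tail)
termination_by (ls.map List.length).sum
decreasing_by
  have hne : ls ≠ [] := fun hh => h (Or.inl hh)
  have hall : ∀ y ∈ ls, y ≠ [] := by
    intro y hy hynil
    exact h (Or.inr (List.any_eq_true.mpr ⟨y, hy, by simp [hynil]⟩))
  simpa using pv_tail_sum_lt ls hne hall

-- the 'for words in zip(*word_lists)' loop with its break
def pvPrefLoop : List (List String) → List String
  | [] => []
  | row :: rest =>
    if (PySem.Set.ofList row).length = 1 then row.headD "" :: pvPrefLoop rest
    else []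

def compress_sentences (sentences : List String) : String :=
  let word_lists := sentences.map PySem.Str.split₀
  let pref := pvPrefLoop (pvZipStar word_lists)
  if pref = [] then PySem.Str.join " and " sentences
  else
    let differences := word_lists.map (fun w => PySem.Str.join " " (w.drop pref.length))
    PySem.Str.join " " pref ++ " " ++ PySem.Str.join " and " differences

-- ===== PORT B =====

-- inner loop of B: common prefix of two word lists (zip + break + append)
def pvLcp2 : List String → List String → List String
  | a :: as, b :: bs => if a = b then a :: pvLcp2 as bs else []
  | _, _ => []

def compress_sentences_alt (sentences : List String) : String :=
  let word_lists := sentences.map PySem.Str.split₀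
  match word_lists with
  | [] => PySem.Str.join " and " sentences
  | w0 :: rest =>
    let pref := rest.foldl pvLcp2 w0
    if pref = [] then PySem.Str.join " and " sentences
    else
      let differences := (w0 :: rest).map (fun w => PySem.Str.join " " (w.drop pref.length))
      PySem.Str.join " " pref ++ " " ++ PySem.Str.join " and " differences

-- ===== PRECONDITION & SPEC =====
def Spec_compress_sentences (sentences : List String) (out : String) : Prop := out = compress_sentences_alt sentences
instance (sentences : List String) (out : String) : Decidable (Spec_compress_sentences sentences out) := by unfold Spec_compress_sentences; infer_instance

-- ===== CLAIM (what is proved, stated in full; the proofs are below) =====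
def Claim_equal_compress_sentences : Prop := ∀ (sentences : List String), Dom_compress_sentences sentences → Spec_compress_sentences sentences (compress_sentences sentences)

-- ===== LEMMAS AND PROOFS =====

theorem lcp2_nil_left (b : List String) : pvLcp2 [] b = [] := by
  cases b <;> rfl

theorem lcp2_nil_right (a : List String) : pvLcp2 a [] = [] := by
  cases a <;> rfl

theorem foldl_lcp2_nil (rest : List (List String)) : rest.foldl pvLcp2 [] = [] := by
  induction rest with
  | nil => rfl
  | cons y ys ih => simpa [lcp2_nil_left] using ih

theorem foldl_lcp2_mem_nil (rest : List (List String)) (acc : List String)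
    (h : [] ∈ rest) : rest.foldl pvLcp2 acc = [] := by
  induction rest generalizing acc with
  | nil => simp at h
  | cons y ys ih =>
    rcases List.mem_cons.mp h with h1 | h1
    · subst h1; simpa [lcp2_nil_right] using foldl_lcp2_nil ys
    · exact ih _ h1

theorem foldl_lcp2_head_ne (rest : List (List String)) (a : String) (as : List String)
    (h : ∃ y ∈ rest, y.head? ≠ some a) : rest.foldl pvLcp2 (a :: as) = [] := by
  induction rest generalizing as with
  | nil => simp at h
  | cons y ys ih =>
    by_cases hy : y.head? = some a
    · cases y with
      | nil => simp at hy
      | cons b bs =>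
        simp only [List.head?_cons, Option.some.injEq] at hy
        subst hy
        rcases h with ⟨z, hz, hzne⟩
        rcases List.mem_cons.mp hz with h1 | h1
        · exact absurd (by rw [h1]; rfl) hzne
        · simpa [List.foldl_cons, pvLcp2] using ih (pvLcp2 as bs) ⟨z, h1, hzne⟩
    · cases y with
      | nil => simpa [List.foldl_cons, lcp2_nil_right] using foldl_lcp2_nil ys
      | cons b bs =>
        have hba : ¬ a = b := by
          intro hab; exact hy (by simp [hab])
        simp only [List.foldl_cons, pvLcp2, if_neg hba]
        exact foldl_lcp2_nil ys

theorem foldl_lcp2_cons (rest : List (List String)) (a : String) (as : List String)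
    (h : ∀ y ∈ rest, y.head? = some a) :
    rest.foldl pvLcp2 (a :: as) = a :: (rest.map List.tail).foldl pvLcp2 as := by
  induction rest generalizing as with
  | nil => simp
  | cons y ys ih =>
    cases y with
    | nil => exact absurd (h [] (by simp)) (by simp)
    | cons b bs =>
      have hb : b = a := by simpa using h (b :: bs) (by simp)
      subst hb
      simp only [List.foldl_cons, pvLcp2, ite_true, List.map_cons, List.tail_cons]
      exact ih (pvLcp2 as bs) (fun y hy => h y (by simp [hy]))

-- a Nodup list all of whose elements equal a is [] or [a]
theorem nodup_all_eq {α : Type} (s : List α) (a : α) (hnd : s.Nodup)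
    (ha : ∀ x ∈ s, x = a) : s = [] ∨ s = [a] := by
  cases s with
  | nil => exact Or.inl rfl
  | cons x xs =>
    right
    have hx : x = a := ha x (by simp)
    subst hx
    cases xs with
    | nil => rfl
    | cons y ys =>
      have hy : y = x := ha y (by simp)
      subst hy
      simp at hnd

theorem ofList_len_one_of_all_eq (l : List String) (a : String) (hne : l ≠ [])
    (h : ∀ x ∈ l, x = a) : (PySem.Set.ofList l).length = 1 := by
  have hnd := PySem.Set.nodup_ofList (xs := l)
  have hmem : ∀ x ∈ PySem.Set.ofList l, x = a := by
    intro x hx; exact h x ((PySem.Set.mem_ofList l x).mp hx)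
  rcases nodup_all_eq _ a hnd hmem with h1 | h1
  · exfalso
    have : a ∈ l := by
      cases l with
      | nil => exact absurd rfl hne
      | cons z zs => exact (h z (by simp)) ▸ (by simp)
    have := (PySem.Set.mem_ofList l a).mpr this
    simp [h1] at this
  · simp [h1]

theorem ofList_len_ne_one (l : List String) (a b : String) (hab : a ≠ b)
    (ha : a ∈ l) (hb : b ∈ l) : ¬ (PySem.Set.ofList l).length = 1 := by
  intro h1
  have ha' := (PySem.Set.mem_ofList l a).mpr ha
  have hb' := (PySem.Set.mem_ofList l b).mpr hb
  cases hS : PySem.Set.ofList l with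
  | nil => simp [hS] at ha'
  | cons c cs =>
    rw [hS] at h1 ha' hb'
    have hcs : cs = [] := by
      cases cs with
      | nil => rfl
      | cons d ds => simp at h1
    subst hcs
    simp at ha' hb'
    exact hab (ha'.trans hb'.symm)

-- main lemma: A's column scan computes the fold of pairwise LCPs
theorem main_lemma : ∀ (n : ℕ) (w0 : List String) (rest : List (List String)),
    ((w0 :: rest).map List.length).sum ≤ n →
    pvPrefLoop (pvZipStar (w0 :: rest)) = rest.foldl pvLcp2 w0 := by
  intro n
  induction n with
  | zero =>
    intro w0 rest hsum
    have hw0 : w0 = [] := by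
      simp only [List.map_cons, List.sum_cons] at hsum
      exact List.eq_nil_of_length_eq_zero (by omega)
    subst hw0
    rw [pvZipStar.eq_def]
    simp [pvPrefLoop, foldl_lcp2_nil]
  | succ m ih =>
    intro w0 rest hsum
    by_cases hemp : (w0 :: rest).any (·.isEmpty)
    · rw [pvZipStar.eq_def]
      rw [dif_pos (Or.inr hemp)]
      simp only [List.any_eq_true, List.isEmpty_iff] at hemp
      rcases hemp with ⟨y, hy, hynil⟩
      subst hynil
      rcases List.mem_cons.mp hy with h1 | h1
      · rw [← h1]; simp [pvPrefLoop, foldl_lcp2_nil]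
      · simp [pvPrefLoop, foldl_lcp2_mem_nil rest w0 h1]
    · have hnotdis : ¬ ((w0 :: rest) = [] ∨ (w0 :: rest).any (·.isEmpty)) := by
        simp [hemp]
      rw [pvZipStar.eq_def, dif_neg hnotdis]
      simp only [List.any_eq_true, List.isEmpty_iff, not_exists, not_and] at hemp
      cases w0 with
      | nil => exact absurd rfl (hemp [] (by simp))
      | cons a as =>
        by_cases hall : ∀ y ∈ rest, y.head? = some a
        · -- all heads equal: column accepted
          have hset : (PySem.Set.ofList (((a :: as) :: rest).map
              (fun w => w.headD ""))).length = 1 := by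
            apply ofList_len_one_of_all_eq _ a (by simp)
            intro x hx
            simp only [List.mem_map] at hx
            rcases hx with ⟨w, hw, hwx⟩
            rcases List.mem_cons.mp hw with h1 | h1
            · subst h1; simpa using hwx.symm
            · have := hall w h1
              cases w with
              | nil => simp at this
              | cons b bs =>
                simp only [List.head?_cons, Option.some.injEq] at this
                rw [← hwx]; simpa using this
          rw [pvPrefLoop, if_pos hset]
          have hmapheads : (((a :: as) :: rest).map (fun w => w.headD "")).headD "" = a := by
            simp
          rw [hmapheads]
          have hsum' : ((((a :: as) :: rest).map List.tail).map List.length).sum ≤ m := by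
            simp only [List.map_cons, List.sum_cons, List.map_map] at hsum ⊢
            have : ∀ (l : List (List String)), (∀ y ∈ l, y ≠ []) →
                (l.map (List.length ∘ List.tail)).sum + l.length ≤ (l.map List.length).sum := by
              intro l hl
              induction l with
              | nil => simp
              | cons z zs ihz =>
                have hz : z ≠ [] := hl z (by simp)
                have hlen : z.tail.length + 1 ≤ z.length := by
                  cases z with
                  | nil => exact absurd rfl hz
                  | cons c cs => simp
                have := ihz (fun y hy => hl y (by simp [hy]))
                simp only [List.map_cons, List.sum_cons, List.length_cons, Function.comp] at *
                omega
            have h1 := this rest (fun y hy => hemp y (by simp [hy]))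
            simp only [] at h1 ⊢
            have hres : 0 ≤ rest.length := Nat.zero_le _
            simp only [List.tail_cons, List.length_cons] at hsum ⊢
            omega
          have hIH := ih as (rest.map List.tail) (by simpa using hsum')
          simp only [List.map_cons, List.tail_cons] at hIH ⊢
          rw [hIH, foldl_lcp2_cons rest a as hall]
        · -- some later head differs: column rejected, fold collapses
          push Not at hall
          rcases hall with ⟨y, hy, hyne⟩
          cases y with
          | nil => exact absurd rfl (hemp [] (by simp [hy]))
          | cons b bs =>
            have hba : b ≠ a := by
              intro hba; exact hyne (by simp [hba])
            have hset : ¬ (PySem.Set.ofList (((a :: as) :: rest).map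
                (fun w => w.headD ""))).length = 1 := by
              apply ofList_len_ne_one _ a b (Ne.symm hba)
              · exact List.mem_map.mpr ⟨a :: as, by simp, by simp⟩
              · exact List.mem_map.mpr ⟨b :: bs, by simp [hy], by simp⟩
            rw [pvPrefLoop, if_neg hset]
            exact (foldl_lcp2_head_ne rest a as ⟨b :: bs, hy, by simpa using hba⟩).symm

-- ===== VERDICT (by name: the statement is the Claim_ definition above) =====
theorem compress_sentences_spec : Claim_equal_compress_sentences := by
  unfold Claim_equal_compress_sentences
  intro sentences _
  unfold Spec_compress_sentences compress_sentences compress_sentences_alt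
  cases hs : sentences.map PySem.Str.split₀ with
  | nil =>
    simp only [hs]
    rw [pvZipStar.eq_def]
    simp [pvPrefLoop]
  | cons w0 rest =>
    simp only [hs]
    rw [main_lemma (((w0 :: rest).map List.length).sum) w0 rest le_rfl]
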